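-- pv_equiv track=rewrite | github.com/srinivasaperisetla/AP-Content-Compiler | utility_functions.py | get_priority_los
-- ===== SOURCE A (Python) =====
-- from typing import Dict, List
--
-- def get_priority_los(coverage: Dict[str, int], allowed_los: List[str], top_n: int = None) -> List[str]:
-- 	"""
-- 	Get under-covered LOs to prioritize in next generation.
--
-- 	Args:
-- 		coverage: Current LO usage counts
-- 		allowed_los: LOs allowed for this unit
-- 		top_n: Return top N least-covered (default: bottom 50%)
--
-- 	Returns:
-- 		List of LO IDs sorted by coverage (ascending)
-- 	"""
-- 	if not coverage:
-- 		return allowed_los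
--
-- 	# Get coverage counts for allowed LOs
-- 	lo_counts = [(lo, coverage.get(lo, 0)) for lo in allowed_los]
--
-- 	# Sort by count (ascending)
-- 	lo_counts.sort(key=lambda x: x[1])
--
-- 	# Return bottom N
-- 	if top_n is None:
-- 		top_n = max(len(lo_counts) // 2, 1)  # Bottom 50%
--
-- 	return [lo for lo, _ in lo_counts[:top_n]]
-- ===== SOURCE B (Python) =====
-- import heapq
--
-- def get_priority_los(coverage, allowed_los, top_n=None):
--     if not coverage:
--         return allowed_los
--     if top_n is None:
--         top_n = max(len(allowed_los) // 2, 1)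
--     return heapq.nsmallest(top_n, allowed_los, key=lambda lo: coverage.get(lo, 0))
-- ===== Notes on version B (the rewrite author's own statement) =====
-- stated objective: idiomatic
-- what changed: Replaces the decorate-with-counts / full-sort / slice / undecorate pipeline by a single heapq.nsmallest(k, allowed_los, key=...) selection, which picks the k least-covered LOs directly (stable on input order, matching A's stable sort tie-break).
-- outside the precondition, e.g. on get_priority_los({'a': 1}, ['a', 'b', 'c'], -1): A returns ['b', 'c'], B returns []
import Mathlib
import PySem

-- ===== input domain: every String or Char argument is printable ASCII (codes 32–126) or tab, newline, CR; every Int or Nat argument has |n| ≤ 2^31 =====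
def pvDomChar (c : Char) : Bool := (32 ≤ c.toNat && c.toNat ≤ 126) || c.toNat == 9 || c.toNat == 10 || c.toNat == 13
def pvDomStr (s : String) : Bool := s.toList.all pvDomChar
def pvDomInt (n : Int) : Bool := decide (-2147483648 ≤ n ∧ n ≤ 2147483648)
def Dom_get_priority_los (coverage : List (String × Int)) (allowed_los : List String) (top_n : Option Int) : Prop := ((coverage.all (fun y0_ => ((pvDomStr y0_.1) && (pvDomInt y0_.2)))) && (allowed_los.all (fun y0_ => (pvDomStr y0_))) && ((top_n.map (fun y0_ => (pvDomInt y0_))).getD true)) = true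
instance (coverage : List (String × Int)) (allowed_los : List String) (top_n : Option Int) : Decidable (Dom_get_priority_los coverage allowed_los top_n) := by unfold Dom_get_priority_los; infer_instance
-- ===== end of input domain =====

-- B replaces A's decorate-sort-slice-undecorate pipeline with a direct heapq.nsmallest
-- k-selection keyed by coverage (idiomatic; same values under Pre_).


-- ===== PORT A =====
def get_priority_los (coverage : List (String × Int)) (allowed_los : List String) (top_n : Option Int) : List String :=
  if coverage = [] then allowed_los
  else
    let lo_counts := allowed_los.map (fun lo => (lo, (PySem.Dict.mk coverage).getD lo 0))
    let lo_counts := PySem.List.sorted lo_counts (fun x => x.2) false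
    let k : Int :=
      match top_n with
      | none => max (PySem.Int.floordiv (lo_counts.length : Int) 2) 1
      | some n => n
    (PySem.List.slice lo_counts none (some k)).map (fun x => x.1)

-- ===== PORT B =====
-- heapq.nsmallest(n, xs, key) ported by its contract: the n smallest by key, stable.
def pyNsmallest (n : Int) (key : String → Int) (xs : List String) : List String :=
  (PySem.List.sorted xs key false).take n.toNat

def get_priority_los_alt (coverage : List (String × Int)) (allowed_los : List String) (top_n : Option Int) : List String :=
  if coverage = [] then allowed_los
  else
    let k : Int :=
      match top_n with
      | none => max (PySem.Int.floordiv (allowed_los.length : Int) 2) 1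
      | some n => n
    pyNsmallest k (fun lo => (PySem.Dict.mk coverage).getD lo 0) allowed_los

-- ===== PRECONDITION & SPEC =====
-- Pre_ excludes inputs with a nonempty coverage and a NEGATIVE explicit top_n of magnitude
-- smaller than len(allowed_los): asking for a negative number of "top N" items is a corner
-- nobody would specify, where A's slice [:top_n] accidentally keeps all but the last |top_n|
-- elements while B's nsmallest naturally returns [] (when |top_n| >= the length both return
-- [] and such inputs stay inside Pre_).
def Pre_get_priority_los (coverage : List (String × Int)) (allowed_los : List String) (top_n : Option Int) : Prop :=
  coverage = [] ∨ 0 ≤ top_n.getD 0 ∨ (allowed_los.length : Int) ≤ -(top_n.getD 0)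
instance (coverage : List (String × Int)) (allowed_los : List String) (top_n : Option Int) : Decidable (Pre_get_priority_los coverage allowed_los top_n) := by unfold Pre_get_priority_los; infer_instance

def pvWitness_get_priority_los : (List (String × Int)) × List String × Option Int :=
  ([("a", 1)], ["a", "b"], none)

def Spec_get_priority_los (coverage : List (String × Int)) (allowed_los : List String) (top_n : Option Int) (out : List String) : Prop := out = get_priority_los_alt coverage allowed_los top_n
instance (coverage : List (String × Int)) (allowed_los : List String) (top_n : Option Int) (out : List String) : Decidable (Spec_get_priority_los coverage allowed_los top_n out) := by unfold Spec_get_priority_los; infer_instance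

-- ===== CLAIM (what is proved, stated in full; the proofs are below) =====
def Claim_equal_get_priority_los : Prop := ∀ (coverage : List (String × Int)) (allowed_los : List String) (top_n : Option Int), Dom_get_priority_los coverage allowed_los top_n → Pre_get_priority_los coverage allowed_los top_n → Spec_get_priority_los coverage allowed_los top_n (get_priority_los coverage allowed_los top_n)

-- ===== LEMMAS AND PROOFS =====

-- insertBy commutes with decorating each element by (·, c ·).
theorem pv_insertBy_map (c : String → Int) (x : String) (ys : List String) :
    PySem.List.insertBy (fun a b : String × Int => decide (a.2 < b.2)) (x, c x)
        (ys.map (fun lo => (lo, c lo)))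
      = (PySem.List.insertBy (fun a b : String => decide (c a < c b)) x ys).map
          (fun lo => (lo, c lo)) := by
  induction ys with
  | nil => simp [PySem.List.insertBy]
  | cons y t ih =>
    simp only [List.map_cons, PySem.List.insertBy]
    split_ifs <;> simp_all

theorem pv_foldl_insertBy_map (c : String → Int) (xs : List String) (acc : List String) :
    (xs.map (fun lo => (lo, c lo))).foldl
        (fun acc x => PySem.List.insertBy (fun a b : String × Int => decide (a.2 < b.2)) x acc)
        (acc.map (fun lo => (lo, c lo)))
      = (xs.foldl (fun acc x => PySem.List.insertBy (fun a b : String => decide (c a < c b)) x acc) acc).map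
          (fun lo => (lo, c lo)) := by
  induction xs generalizing acc with
  | nil => rfl
  | cons x t ih =>
    simp only [List.map_cons, List.foldl_cons]
    rw [pv_insertBy_map c x acc, ih]

-- sorting the decorated list by its second component is decorating the key-sorted list
theorem pv_sorted_snd_map (c : String → Int) (xs : List String) :
    PySem.List.sorted (xs.map (fun lo => (lo, c lo))) (fun x => x.2) false
      = (PySem.List.sorted xs c false).map (fun lo => (lo, c lo)) := by
  rw [PySem.List.sorted_eq_foldl_insertBy, PySem.List.sorted_eq_foldl_insertBy]
  simpa using pv_foldl_insertBy_map c xs []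

-- ===== VERDICT (by name: the statement is the Claim_ definition above) =====
theorem get_priority_los_spec : Claim_equal_get_priority_los := by
  intro coverage allowed_los top_n _ hpre
  unfold Spec_get_priority_los get_priority_los get_priority_los_alt pyNsmallest
  by_cases hc : coverage = []
  · simp [hc]
  · simp only [hc, if_false]
    have hsorted := pv_sorted_snd_map (fun lo => (PySem.Dict.mk coverage).getD lo 0) allowed_los
    have hdiv : PySem.Int.floordiv ((allowed_los.length : Nat) : Int) 2
        = ((allowed_los.length : Nat) : Int) / 2 :=
      PySem.Int.floordiv_eq_ediv_of_pos (by norm_num)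
    cases top_n with
    | none =>
      have hk0 : (0:Int) ≤ max (PySem.Int.floordiv ((allowed_los.length : Nat) : Int) 2) 1 := by
        rw [hdiv]; omega
      simp only [hsorted, List.length_map, PySem.List.length_sorted,
        PySem.List.slice_to _ hk0, ← List.map_take, List.map_map]
      simp [Function.comp_def]
    | some n =>
      by_cases hk0 : (0:Int) ≤ n
      · simp only [hsorted, PySem.List.slice_to _ hk0, ← List.map_take, List.map_map]
        simp [Function.comp_def]
      · have hlen : (allowed_los.length : Int) ≤ -n := by
          unfold Pre_get_priority_los at hpre
          rcases hpre with h | h | h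
          · exact absurd h hc
          · exact absurd (by simpa using h) hk0
          · simpa using h
        have hn : n = -((((-n).toNat : Nat)) : Int) := by omega
        rw [hn, PySem.List.slice_to_neg_natCast _ _ (by omega)]
        have h1 : (PySem.List.sorted (allowed_los.map
            (fun lo => (lo, (PySem.Dict.mk coverage).getD lo 0))) (fun x => x.2) false).length
            - (-n).toNat = 0 := by
          rw [PySem.List.length_sorted, List.length_map]; omega
        have h2 : (-((((-n).toNat : Nat)) : Int)).toNat = 0 := by omega
        rw [h1, h2]
        simp
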